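-- pv_equiv track=rewrite | github.com/MikeKemmerer/LiveStreamScheduler | fb_scheduler.py | _fit_title_parts
-- ===== SOURCE A (Python) =====
-- def _fit_title_parts(parts: list[str], max_length: int = 100) -> str:
--     used: list[str] = []
--     current = ""
--     for part in parts:
--         clean = part.strip()
--         if not clean or clean in used:
--             continue
--         candidate = clean if not current else f"{current}; {clean}"
--         if len(candidate) > max_length:
--             break
--         current = candidate
--         used.append(clean)
--     return current
-- ===== SOURCE B (Python) =====
-- def _fit_title_parts(parts: list[str], max_length: int = 100) -> str:
--     # pass 1: ordered de-duplication of stripped, non-empty parts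
--     seen = set()
--     ordered = []
--     for part in parts:
--         clean = part.strip()
--         if clean and clean not in seen:
--             seen.add(clean)
--             ordered.append(clean)
--     # pass 2: accumulate joined title, stopping at the first overflow
--     result = ""
--     for clean in ordered:
--         candidate = clean if not result else f"{result}; {clean}"
--         if len(candidate) > max_length:
--             break
--         result = candidate
--     return result
-- ===== Notes on version B (the rewrite author's own statement) =====
-- stated objective: alternative
-- what changed: A's single fused loop (which rescans the growing 'used' list for every part) is split into two passes: an ordered set-based deduplication of stripped parts, then a separate join loop breaking at the first over-length candidate.
import Mathlib
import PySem

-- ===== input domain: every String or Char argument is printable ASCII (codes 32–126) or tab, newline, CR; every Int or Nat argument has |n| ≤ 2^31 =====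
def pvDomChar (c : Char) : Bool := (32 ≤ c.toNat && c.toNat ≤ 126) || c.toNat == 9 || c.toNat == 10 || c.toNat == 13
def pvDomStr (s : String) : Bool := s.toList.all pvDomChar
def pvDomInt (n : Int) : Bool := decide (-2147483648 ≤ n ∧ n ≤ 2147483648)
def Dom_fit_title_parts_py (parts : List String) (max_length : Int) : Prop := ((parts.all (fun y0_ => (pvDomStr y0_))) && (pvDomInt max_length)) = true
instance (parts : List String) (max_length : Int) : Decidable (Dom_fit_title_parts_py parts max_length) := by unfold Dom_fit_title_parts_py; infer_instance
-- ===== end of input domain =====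

-- B splits A's fused loop into two separate passes (set-based ordered dedup, then join-with-break); equivalence of return values, set membership replaces A's per-part scan of the used list.


-- ===== PORT A =====
-- A's single loop: state (used, current); 'break' is modelled by returning current.
def fitA_loop (parts : List String) (used : List String) (current : String) (max_length : Int) : String :=
  match parts with
  | [] => current
  | part :: rest =>
    let clean := PySem.Str.strip part
    if clean = "" ∨ used.contains clean then
      fitA_loop rest used current max_length
    else
      let candidate := if current = "" then clean else current ++ "; " ++ clean
      if (PySem.Str.len candidate : Int) > max_length then current
      else fitA_loop rest (used ++ [clean]) candidate max_length

def fit_title_parts_py (parts : List String) (max_length : Int) : String :=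
  fitA_loop parts [] "" max_length

-- ===== PORT B =====
-- B pass 1: ordered dedup of stripped non-empty parts (seen : PySem.Set String).
def fitB_dedup (parts : List String) (seen : PySem.Set String) : List String :=
  match parts with
  | [] => []
  | part :: rest =>
    let clean := PySem.Str.strip part
    if clean ≠ "" ∧ ¬ PySem.Set.contains seen clean then
      clean :: fitB_dedup rest (PySem.Set.add seen clean)
    else
      fitB_dedup rest seen

-- B pass 2: accumulate the joined title, break at the first overflow.
def fitB_join (ordered : List String) (result : String) (max_length : Int) : String :=
  match ordered with
  | [] => result
  | clean :: rest =>
    let candidate := if result = "" then clean else result ++ "; " ++ clean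
    if (PySem.Str.len candidate : Int) > max_length then result
    else fitB_join rest candidate max_length

def fit_title_parts_py_alt (parts : List String) (max_length : Int) : String :=
  fitB_join (fitB_dedup parts PySem.Set.empty) "" max_length

-- ===== PRECONDITION & SPEC =====
def Spec_fit_title_parts_py (parts : List String) (max_length : Int) (out : String) : Prop := out = fit_title_parts_py_alt parts max_length
instance (parts : List String) (max_length : Int) (out : String) : Decidable (Spec_fit_title_parts_py parts max_length out) := by unfold Spec_fit_title_parts_py; infer_instance

-- ===== CLAIM (what is proved, stated in full; the proofs are below) =====
def Claim_equal_fit_title_parts_py : Prop := ∀ (parts : List String) (max_length : Int), Dom_fit_title_parts_py parts max_length → Spec_fit_title_parts_py parts max_length (fit_title_parts_py parts max_length)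

-- ===== LEMMAS AND PROOFS =====
-- Invariant: A's fused loop with membership list `seen` equals B's join pass run on
-- B's dedup pass started from the same `seen`.
theorem fitA_eq_join_dedup (parts : List String) (seen : List String)
    (current : String) (max_length : Int) :
    fitA_loop parts seen current max_length =
      fitB_join (fitB_dedup parts seen) current max_length := by
  induction parts generalizing seen current with
  | nil => rfl
  | cons part rest ih =>
    simp only [fitA_loop, fitB_dedup]
    by_cases h1 : PySem.Str.strip part = ""
    · simp [h1, ih]
    · by_cases h2 : PySem.Str.strip part ∈ seen
      · simp [PySem.Set.contains, h1, h2, ih]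
      · have hadd : PySem.Set.add seen (PySem.Str.strip part)
            = seen ++ [PySem.Str.strip part] := by
          simp [PySem.Set.add, PySem.Set.contains, h2]
        have hca : ¬ (PySem.Str.strip part = ""
            ∨ seen.contains (PySem.Str.strip part) = true) := by
          simp [h1, h2]
        have hcb : PySem.Str.strip part ≠ ""
            ∧ ¬ PySem.Set.contains seen (PySem.Str.strip part) = true := by
          simp [PySem.Set.contains, h1, h2]
        rw [if_neg hca, if_pos hcb, hadd]
        simp only [fitB_join]
        split_ifs with h3
        all_goals first | rfl | exact ih _ _

-- ===== VERDICT (by name: the statement is the Claim_ definition above) =====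
theorem fit_title_parts_py_spec : Claim_equal_fit_title_parts_py := by
  intro parts max_length _
  unfold Spec_fit_title_parts_py fit_title_parts_py fit_title_parts_py_alt
  exact fitA_eq_join_dedup parts [] "" max_length
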